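-- pv_equiv track=rewrite | github.com/allenai/covid-sim | api/covid-ai2/alignment.py | print_nicely
-- ===== SOURCE A (Python) =====
-- class color:
--    PURPLE = '\033[95m'
--    CYAN = '\033[96m'
--    DARKCYAN = '\033[36m'
--    BLUE = '\033[94m'
--    GREEN = '\033[92m'
--    YELLOW = '\033[93m'
--    RED = '\033[91m'
--    BOLD = '\033[1m'
--    UNDERLINE = '\033[4m'
--    END = '\033[0m'
--
-- def print_nicely(sent, arg1_borders, arg2_borders):
--     def is_start(k, borders):
--         return len([(s, e) for (s, e) in borders if s == k]) != 0
--
--     def is_end(k, borders):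
--         return len([(s, e) for (s, e) in borders if e == k]) != 0
--
--     sent_lst = sent.split(" ")
--     sent_new = []
--     for i, w in enumerate(sent_lst):
--
--         if is_start(i, arg1_borders) or is_start(i, arg2_borders):
--             type_arg = color.BLUE + "ARG1" if is_start(i, arg1_borders) else color.BLUE + "ARG2"
--             sent_new.append(color.BOLD + "[" + type_arg)
--
--         sent_new.append(w)
--
--         if is_end(i, arg1_borders) or is_end(i, arg2_borders):
--             # type_arg = color.BLUE + "ARG1" if is_end(i,arg1_borders) else "ARG2" + color.END
--             sent_new.append("]" + color.END)
--
--     return " ".join(sent_new)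
-- ===== SOURCE B (Python) =====
-- def print_nicely(sent, arg1_borders, arg2_borders):
--     words = sent.split(" ")
--     n = len(words)
--     pre = [""] * n
--     suf = [""] * n
--     # Border-driven: write markers into per-word prefix/suffix tables;
--     # process ARG2 first so an ARG1 start at the same index overwrites it (A's priority).
--     for tag, borders in (("ARG2", arg2_borders), ("ARG1", arg1_borders)):
--         for s, e in borders:
--             if 0 <= s < n:
--                 pre[s] = "\033[1m[\033[94m" + tag + " "
--             if 0 <= e < n:
--                 suf[e] = " ]\033[0m"
--     return " ".join(pre[i] + words[i] + suf[i] for i in range(n))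
-- ===== Notes on version B (the rewrite author's own statement) =====
-- stated objective: faster
-- what changed: Border-driven instead of word-driven: B loops over the border lists once, writing prefix/suffix markers into per-word tables (ARG2 pass first so ARG1 overwrites, matching A's priority), then joins table+word+table in one pass; A loops over words and rescans both border lists for every word.
import Mathlib
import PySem

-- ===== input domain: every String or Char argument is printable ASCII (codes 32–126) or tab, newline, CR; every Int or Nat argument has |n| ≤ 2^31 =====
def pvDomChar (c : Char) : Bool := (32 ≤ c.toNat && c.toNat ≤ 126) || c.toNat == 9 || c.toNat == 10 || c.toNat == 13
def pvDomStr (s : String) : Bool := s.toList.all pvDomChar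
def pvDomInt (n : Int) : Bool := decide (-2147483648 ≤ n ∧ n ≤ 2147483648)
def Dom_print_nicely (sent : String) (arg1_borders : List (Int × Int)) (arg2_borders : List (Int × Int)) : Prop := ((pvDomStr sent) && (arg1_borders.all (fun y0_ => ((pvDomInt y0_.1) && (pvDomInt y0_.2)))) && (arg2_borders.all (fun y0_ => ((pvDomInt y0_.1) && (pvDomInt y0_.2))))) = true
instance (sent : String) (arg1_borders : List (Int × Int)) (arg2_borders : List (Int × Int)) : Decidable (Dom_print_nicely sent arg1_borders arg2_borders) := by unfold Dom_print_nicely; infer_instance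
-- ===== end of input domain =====

-- B is border-driven: one pass over the borders fills per-word prefix/suffix marker tables, then one join pass — asymptotically faster than A's per-word rescans of the border lists.


-- ===== PORT A =====
def pvColorBLUE : String := "\x1b[94m"
def pvColorBOLD : String := "\x1b[1m"
def pvColorEND : String := "\x1b[0m"

-- A's helper is_start: len([(s,e) for (s,e) in borders if s == k]) != 0
def pvIsStart (k : Int) (borders : List (Int × Int)) : Bool :=
  (borders.filter (fun p => p.1 == k)).length != 0

-- A's helper is_end
def pvIsEnd (k : Int) (borders : List (Int × Int)) : Bool :=
  (borders.filter (fun p => p.2 == k)).length != 0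

def print_nicely (sent : String) (arg1_borders : List (Int × Int)) (arg2_borders : List (Int × Int)) : String :=
  let sent_lst := (PySem.Str.split? sent " ").getD []   -- sep " " ≠ "", so split? is always some
  let sent_new := (PySem.List.enumerate sent_lst).foldl (fun acc iw =>
    let i := iw.1
    let w := iw.2
    let acc := if pvIsStart i arg1_borders || pvIsStart i arg2_borders then
        acc ++ [pvColorBOLD ++ "[" ++ (if pvIsStart i arg1_borders then pvColorBLUE ++ "ARG1" else pvColorBLUE ++ "ARG2")]
      else acc
    let acc := acc ++ [w]
    if pvIsEnd i arg1_borders || pvIsEnd i arg2_borders then acc ++ ["]" ++ pvColorEND] else acc) []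
  PySem.Str.join " " sent_new

-- ===== PORT B =====
-- one Python loop body: for (s,e) in borders: if 0<=s<n: pre[s] = mark; if 0<=e<n: suf[e] = " ]…"
def pvMark (n : Nat) (tag : String) (pq : List String × List String) (se : Int × Int) : List String × List String :=
  ( if 0 ≤ se.1 ∧ se.1 < (n : Int) then pq.1.set se.1.toNat ("\x1b[1m[\x1b[94m" ++ tag ++ " ") else pq.1,
    if 0 ≤ se.2 ∧ se.2 < (n : Int) then pq.2.set se.2.toNat " ]\x1b[0m" else pq.2 )

def print_nicely_alt (sent : String) (arg1_borders : List (Int × Int)) (arg2_borders : List (Int × Int)) : String :=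
  let words := (PySem.Str.split? sent " ").getD []   -- sep " " ≠ "", so split? is always some
  let n := words.length
  let pq : List String × List String := (List.replicate n "", List.replicate n "")
  let pq := arg2_borders.foldl (pvMark n "ARG2") pq    -- ARG2 pass first: ARG1 overwrites on a shared start
  let pq := arg1_borders.foldl (pvMark n "ARG1") pq
  -- pre[i] / words[i] / suf[i]: i ranges over [0, n), so getD's default is never used
  PySem.Str.join " "
    ((List.range n).map (fun i => pq.1.getD i "" ++ words.getD i "" ++ pq.2.getD i ""))

-- ===== PRECONDITION & SPEC =====
def Spec_print_nicely (sent : String) (arg1_borders : List (Int × Int)) (arg2_borders : List (Int × Int)) (out : String) : Prop := out = print_nicely_alt sent arg1_borders arg2_borders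
instance (sent : String) (arg1_borders : List (Int × Int)) (arg2_borders : List (Int × Int)) (out : String) : Decidable (Spec_print_nicely sent arg1_borders arg2_borders out) := by unfold Spec_print_nicely; infer_instance

-- ===== CLAIM (what is proved, stated in full; the proofs are below) =====
def Claim_equal_print_nicely : Prop := ∀ (sent : String) (arg1_borders : List (Int × Int)) (arg2_borders : List (Int × Int)), Dom_print_nicely sent arg1_borders arg2_borders → Spec_print_nicely sent arg1_borders arg2_borders (print_nicely sent arg1_borders arg2_borders)

-- ===== LEMMAS AND PROOFS =====

-- A's per-word token group
def pvTokA (arg1_borders arg2_borders : List (Int × Int)) (i : Int) (w : String) : List String :=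
  (if pvIsStart i arg1_borders || pvIsStart i arg2_borders then
      [pvColorBOLD ++ "[" ++ (if pvIsStart i arg1_borders then pvColorBLUE ++ "ARG1" else pvColorBLUE ++ "ARG2")]
    else []) ++ [w] ++
  (if pvIsEnd i arg1_borders || pvIsEnd i arg2_borders then ["]" ++ pvColorEND] else [])

-- B's per-word decorated string, as a function of the border tests
def pvDec (a1 a2 : List (Int × Int)) (i : Int) (w : String) : String :=
  (if pvIsStart i a1 then "\x1b[1m[\x1b[94mARG1 " else if pvIsStart i a2 then "\x1b[1m[\x1b[94mARG2 " else "")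
  ++ w ++ (if pvIsEnd i a1 || pvIsEnd i a2 then " ]\x1b[0m" else "")

lemma pvStep_eq (a1 a2 : List (Int × Int)) (acc : List String) (iw : Int × String) :
    (fun acc (iw : Int × String) =>
      let i := iw.1
      let w := iw.2
      let acc := if pvIsStart i a1 || pvIsStart i a2 then
          acc ++ [pvColorBOLD ++ "[" ++ (if pvIsStart i a1 then pvColorBLUE ++ "ARG1" else pvColorBLUE ++ "ARG2")]
        else acc
      let acc := acc ++ [w]
      if pvIsEnd i a1 || pvIsEnd i a2 then acc ++ ["]" ++ pvColorEND] else acc) acc iw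
    = acc ++ pvTokA a1 a2 iw.1 iw.2 := by
  simp only [pvTokA]
  split_ifs <;> simp

lemma pvJoinConsNeNil (sep c : List Char) (l : List (List Char)) (hl : l ≠ []) :
    PySem.Chars.join sep (c :: l) = c ++ sep ++ PySem.Chars.join sep l := by
  cases l with
  | nil => exact absurd rfl hl
  | cons t ts => exact PySem.Chars.join_cons_cons sep c t ts

-- joining a nonempty group first is the same as joining the flattened list
lemma pvJoinGroup (sep : List Char) (g : List (List Char)) (hg : g ≠ []) (rest : List (List Char)) :
    PySem.Chars.join sep (g ++ rest) = PySem.Chars.join sep (PySem.Chars.join sep g :: rest) := by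
  induction g with
  | nil => exact absurd rfl hg
  | cons x g ih =>
    cases g with
    | nil => simp [PySem.Chars.join_singleton]
    | cons y g' =>
      rw [show ((x :: y :: g') ++ rest) = x :: ((y :: g') ++ rest) from rfl,
        pvJoinConsNeNil sep x ((y :: g') ++ rest) (by simp),
        ih (by simp),
        PySem.Chars.join_cons_cons sep x y g']
      cases rest with
      | nil => simp [PySem.Chars.join_singleton, List.append_assoc]
      | cons r rs =>
        rw [PySem.Chars.join_cons_cons, PySem.Chars.join_cons_cons]
        simp [List.append_assoc]

-- the join of A's token group (as char lists) is B's decorated word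
lemma pvJoin_tokA (a1 a2 : List (Int × Int)) (i : Int) (w : String) :
    PySem.Chars.join " ".toList ((pvTokA a1 a2 i w).map String.toList)
      = (pvDec a1 a2 i w).toList := by
  simp only [pvTokA, pvDec]
  split_ifs with h1 h2 h3 <;>
    simp_all [PySem.Chars.join_cons_cons, PySem.Chars.join_singleton,
      pvColorBOLD, pvColorBLUE, pvColorEND, String.toList_append]

lemma pvTokA_ne_nil (a1 a2 : List (Int × Int)) (i : Int) (w : String) :
    (pvTokA a1 a2 i w).map String.toList ≠ [] := by
  simp [pvTokA]

lemma pvMain (a1 a2 : List (Int × Int)) (f : Int → String → String)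
    (hdec : ∀ i w, PySem.Chars.join " ".toList ((pvTokA a1 a2 i w).map String.toList)
      = (f i w).toList) (ws : List (Int × String)) :
    PySem.Chars.join " ".toList ((ws.flatMap (fun iw => pvTokA a1 a2 iw.1 iw.2)).map String.toList)
      = PySem.Chars.join " ".toList ((ws.map (fun iw => f iw.1 iw.2)).map String.toList) := by
  induction ws with
  | nil => rfl
  | cons x ws ih =>
    have hg := pvTokA_ne_nil a1 a2 x.1 x.2
    rw [List.flatMap_cons, List.map_append, pvJoinGroup _ _ hg, hdec]
    cases ws with
    | nil => simp
    | cons y ys =>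
      have hrest : ((y :: ys).flatMap (fun iw => pvTokA a1 a2 iw.1 iw.2)).map String.toList ≠ [] := by
        simp only [List.flatMap_cons, List.map_append]
        intro h
        exact pvTokA_ne_nil a1 a2 y.1 y.2 (List.append_eq_nil_iff.mp h).1
      rw [pvJoinConsNeNil _ _ _ hrest, ih,
        show (List.map String.toList (List.map (fun iw => f iw.1 iw.2) (x :: y :: ys)))
          = (f x.1 x.2).toList
            :: List.map String.toList (List.map (fun iw => f iw.1 iw.2) (y :: ys)) from by simp,
        pvJoinConsNeNil _ _ _ (by simp)]

-- lengths are preserved by the marking fold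
lemma pvMark_length (n : Nat) (tg : String) (b : List (Int × Int)) (pq : List String × List String) :
    (b.foldl (pvMark n tg) pq).1.length = pq.1.length ∧ (b.foldl (pvMark n tg) pq).2.length = pq.2.length := by
  induction b generalizing pq with
  | nil => exact ⟨rfl, rfl⟩
  | cons x b ih =>
    rw [List.foldl_cons]
    refine ⟨(ih _).1.trans ?_, (ih _).2.trans ?_⟩ <;>
      · simp only [pvMark]
        split_ifs <;> simp

-- characterization of the prefix table after one tag pass
lemma pvMark_fst_getD (n : Nat) (tg : String) (b : List (Int × Int))
    (pq : List String × List String) (hp : pq.1.length = n) (i : Nat) :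
    (b.foldl (pvMark n tg) pq).1.getD i ""
      = if pvIsStart (i : Int) b ∧ i < n then "\x1b[1m[\x1b[94m" ++ tg ++ " " else pq.1.getD i "" := by
  induction b generalizing pq with
  | nil => simp [pvIsStart]
  | cons x b ih =>
    rw [List.foldl_cons]
    have hp' : (pvMark n tg pq x).1.length = n := by
      simp only [pvMark]; split_ifs <;> simp [hp]
    rw [ih _ hp']
    have hx : (pvMark n tg pq x).1.getD i ""
        = if x.1 = (i : Int) ∧ i < n then "\x1b[1m[\x1b[94m" ++ tg ++ " " else pq.1.getD i "" := by
      simp only [pvMark]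
      by_cases hg : 0 ≤ x.1 ∧ x.1 < (n : Int)
      · rw [if_pos hg]
        by_cases hm : x.1 = (i : Int) ∧ i < n
        · have ht : x.1.toNat = i := by omega
          simp [List.getD, hp, hm]
        · have hne : x.1.toNat ≠ i := by omega
          simp [List.getD, List.getElem?_set_ne hne, hm]
      · rw [if_neg hg]
        have hm : ¬ (x.1 = (i : Int) ∧ i < n) := by
          rintro ⟨h1, h2⟩; exact hg ⟨by omega, by omega⟩
        simp [hm]
    rw [hx]
    have hstart : pvIsStart (i : Int) (x :: b) = ((x.1 == (i : Int)) || pvIsStart (i : Int) b) := by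
      simp only [pvIsStart, List.filter_cons]
      by_cases hxe : x.1 = (i : Int) <;> simp [hxe]
    rw [hstart]
    by_cases h1 : pvIsStart (i : Int) b <;> by_cases h2 : x.1 = (i : Int) <;>
      by_cases h3 : i < n <;> simp [h1, h2, h3]

-- characterization of the suffix table after one tag pass
lemma pvMark_snd_getD (n : Nat) (tg : String) (b : List (Int × Int))
    (pq : List String × List String) (hq : pq.2.length = n) (i : Nat) :
    (b.foldl (pvMark n tg) pq).2.getD i ""
      = if pvIsEnd (i : Int) b ∧ i < n then " ]\x1b[0m" else pq.2.getD i "" := by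
  induction b generalizing pq with
  | nil => simp [pvIsEnd]
  | cons x b ih =>
    rw [List.foldl_cons]
    have hq' : (pvMark n tg pq x).2.length = n := by
      simp only [pvMark]; split_ifs <;> simp [hq]
    rw [ih _ hq']
    have hx : (pvMark n tg pq x).2.getD i ""
        = if x.2 = (i : Int) ∧ i < n then " ]\x1b[0m" else pq.2.getD i "" := by
      simp only [pvMark]
      by_cases hg : 0 ≤ x.2 ∧ x.2 < (n : Int)
      · rw [if_pos hg]
        by_cases hm : x.2 = (i : Int) ∧ i < n
        · have ht : x.2.toNat = i := by omega
          simp [List.getD, hq, hm]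
        · have hne : x.2.toNat ≠ i := by omega
          simp [List.getD, List.getElem?_set_ne hne, hm]
      · rw [if_neg hg]
        have hm : ¬ (x.2 = (i : Int) ∧ i < n) := by
          rintro ⟨h1, h2⟩; exact hg ⟨by omega, by omega⟩
        simp [hm]
    rw [hx]
    have hend : pvIsEnd (i : Int) (x :: b) = ((x.2 == (i : Int)) || pvIsEnd (i : Int) b) := by
      simp only [pvIsEnd, List.filter_cons]
      by_cases hxe : x.2 = (i : Int) <;> simp [hxe]
    rw [hend]
    by_cases h1 : pvIsEnd (i : Int) b <;> by_cases h2 : x.2 = (i : Int) <;>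
      by_cases h3 : i < n <;> simp [h1, h2, h3]

-- ===== VERDICT (by name: the statement is the Claim_ definition above) =====
theorem print_nicely_spec : Claim_equal_print_nicely := by
  intro sent a1 a2 _
  unfold Spec_print_nicely print_nicely print_nicely_alt
  set words := (PySem.Str.split? sent " ").getD [] with hw
  set n := words.length with hn
  apply String.toList_inj.mp
  rw [PySem.Str.toList_join, PySem.Str.toList_join]
  have hstepfun : (fun (acc : List String) (iw : Int × String) =>
      let i := iw.1
      let w := iw.2
      let acc := if pvIsStart i a1 || pvIsStart i a2 then
          acc ++ [pvColorBOLD ++ "[" ++ (if pvIsStart i a1 then pvColorBLUE ++ "ARG1" else pvColorBLUE ++ "ARG2")]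
        else acc
      let acc := acc ++ [w]
      if pvIsEnd i a1 || pvIsEnd i a2 then acc ++ ["]" ++ pvColorEND] else acc)
      = (fun acc iw => acc ++ pvTokA a1 a2 iw.1 iw.2) := by
    funext acc iw
    exact pvStep_eq a1 a2 acc iw
  rw [hstepfun, PySem.List.foldl_append_eq_flatMap, List.nil_append]
  -- B's range-indexed list is the enumerate-mapped list of decorated words
  set pq0 : List String × List String := (List.replicate n "", List.replicate n "") with hpq0
  set pq1 := a2.foldl (pvMark n "ARG2") pq0 with hpq1
  set pq2 := a1.foldl (pvMark n "ARG1") pq1 with hpq2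
  have hlen1 : pq1.1.length = n ∧ pq1.2.length = n := by
    have := pvMark_length n "ARG2" a2 pq0
    simpa [hpq0] using this
  have hpre : ∀ i : Nat, i < n → pq2.1.getD i ""
      = (if pvIsStart (i : Int) a1 then "\x1b[1m[\x1b[94mARG1 "
         else if pvIsStart (i : Int) a2 then "\x1b[1m[\x1b[94mARG2 " else "") := by
    intro i hi
    rw [hpq2, pvMark_fst_getD n "ARG1" a1 pq1 hlen1.1 i,
      hpq1, pvMark_fst_getD n "ARG2" a2 pq0 (by simp [hpq0]) i]
    by_cases h1 : pvIsStart (i : Int) a1 <;> by_cases h2 : pvIsStart (i : Int) a2 <;>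
      simp [h1, h2, hi, hpq0, List.getD]
  have hsuf : ∀ i : Nat, i < n → pq2.2.getD i ""
      = (if pvIsEnd (i : Int) a1 || pvIsEnd (i : Int) a2 then " ]\x1b[0m" else "") := by
    intro i hi
    rw [hpq2, pvMark_snd_getD n "ARG1" a1 pq1 hlen1.2 i,
      hpq1, pvMark_snd_getD n "ARG2" a2 pq0 (by simp [hpq0]) i]
    by_cases h1 : pvIsEnd (i : Int) a1 <;> by_cases h2 : pvIsEnd (i : Int) a2 <;>
      simp [h1, h2, hi, hpq0, List.getD]
  have hlist : (List.range n).map (fun i => pq2.1.getD i "" ++ words.getD i "" ++ pq2.2.getD i "")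
      = (PySem.List.enumerate words).map (fun iw => pvDec a1 a2 iw.1 iw.2) := by
    apply List.ext_getElem
    · simp [PySem.List.length_enumerate, hn]
    · intro i hi1 hi2
      have hi : i < n := by simpa using hi1
      simp only [List.getElem_map, List.getElem_range, PySem.List.getElem_enumerate]
      rw [hpre i hi, hsuf i hi, pvDec]
      simp [List.getD, List.getElem?_eq_getElem (show i < words.length from hi)]
  rw [hlist]
  exact pvMain a1 a2 _ (pvJoin_tokA a1 a2) _
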